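-- pv_equiv track=rewrite | github.com/LongStoryMedia/llmmllab | inference/server/context/intent.py | should_retrieve_memories
-- ===== SOURCE A (Python) =====
-- def should_retrieve_memories(text: str) -> bool:
--     """
--     Determine if a query likely needs memory retrieval.
--
--     Args:
--         text: The user's query text
--
--     Returns:
--         True if the query likely needs memory retrieval, False otherwise
--     """
--     if not text:
--         return False
--
--     # Convert to lowercase for case-insensitive matching
--     lower_text = text.lower()
--
--     # Keywords and phrases suggesting the user is asking about past information
--     memory_triggers = [
--         "remember",
--         "recall",
--         "previous",
--         "earlier",
--         "before",
--         "last time",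
--         "you said",
--         "mentioned",
--         "told me",
--         "yesterday",
--         "last week",
--         "forgot",
--         "remind me",
--         "i asked",
--         "we discussed",
--         "we talked about",
--         "what did i",
--         "what did you",
--         "did i tell",
--         "did you tell",
--     ]
--
--     for trigger in memory_triggers:
--         if trigger in lower_text:
--             return True
--
--     # Question patterns that often benefit from memory retrieval
--     question_patterns = [
--         "what was",
--         "who was",
--         "where was",
--         "when was",
--         "how was",
--         "what were",
--         "who were",
--         "where were",
--         "when were",
--         "how were",
--         "what did",
--         "who did",
--         "where did",
--         "when did",
--         "how did",
--     ]
--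
--     for pattern in question_patterns:
--         if pattern in lower_text:
--             return True
--
--     return False
-- ===== SOURCE B (Python) =====
-- _PHRASES = [
--     "remember", "recall", "previous", "earlier", "before", "last time",
--     "you said", "mentioned", "told me", "yesterday", "last week", "forgot",
--     "remind me", "i asked", "we discussed", "we talked about", "what did i",
--     "what did you", "did i tell", "did you tell",
--     "what was", "who was", "where was", "when was", "how was",
--     "what were", "who were", "where were", "when were", "how were",
--     "what did", "who did", "where did", "when did", "how did",
-- ]
--
--
-- def should_retrieve_memories(text: str) -> bool:
--     if not text:
--         return False
--     lower_text = text.lower()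
--     # single left-to-right scan over positions: at each position test whether
--     # any phrase starts there (alternation match), instead of one full
--     # substring scan per phrase
--     for i in range(len(lower_text)):
--         if any(lower_text.startswith(p, i) for p in _PHRASES):
--             return True
--     return False
-- ===== Notes on version B (the rewrite author's own statement) =====
-- stated objective: alternative
-- what changed: B replaces A's phrase-major loop (one full substring scan of the text per phrase, two sequential phrase lists) with a single position-major scan of the lowered text that tests all phrases as prefixes at each position.
import Mathlib
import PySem

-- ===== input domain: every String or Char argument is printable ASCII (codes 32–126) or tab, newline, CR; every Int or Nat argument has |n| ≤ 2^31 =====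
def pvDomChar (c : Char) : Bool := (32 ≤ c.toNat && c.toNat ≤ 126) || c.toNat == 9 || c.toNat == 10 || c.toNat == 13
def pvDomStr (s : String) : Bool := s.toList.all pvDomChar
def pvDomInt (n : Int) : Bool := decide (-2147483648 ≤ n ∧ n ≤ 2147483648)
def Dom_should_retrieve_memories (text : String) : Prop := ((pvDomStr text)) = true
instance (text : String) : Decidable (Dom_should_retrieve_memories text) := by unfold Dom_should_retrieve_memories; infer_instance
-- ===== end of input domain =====

-- B replaces A's per-phrase substring scans with one position-major scan of the text
-- testing all phrases as prefixes at each position (alternative, same boolean result).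


-- ===== PORT A =====
def pvMemoryTriggers : List String :=
  ["remember", "recall", "previous", "earlier", "before", "last time",
   "you said", "mentioned", "told me", "yesterday", "last week", "forgot",
   "remind me", "i asked", "we discussed", "we talked about", "what did i",
   "what did you", "did i tell", "did you tell"]

def pvQuestionPatterns : List String :=
  ["what was", "who was", "where was", "when was", "how was",
   "what were", "who were", "where were", "when were", "how were",
   "what did", "who did", "where did", "when did", "how did"]

-- 'for trigger in list: if trigger in lower_text: return True' as structural recursion
def pvLoopA (ps : List String) (s : String) : Bool :=
  match ps with
  | [] => false
  | p :: rest => if PySem.Str.isIn p s then true else pvLoopA rest s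

def should_retrieve_memories (text : String) : Bool :=
  if text = "" then false
  else
    let lower_text := PySem.Str.lower text
    if pvLoopA pvMemoryTriggers lower_text then true
    else if pvLoopA pvQuestionPatterns lower_text then true
    else false

-- ===== PORT B =====
def pvPhrases : List (List Char) :=
  (pvMemoryTriggers ++ pvQuestionPatterns).map String.toList

-- 'for i in range(len(s)): if any(s.startswith(p, i) for p in phrases): return True'
-- walked as recursion over the suffixes of the char list
def pvScanB (phrases : List (List Char)) : List Char → Bool
  | [] => false
  | c :: rest =>
    if phrases.any (fun p => p.isPrefixOf (c :: rest)) then true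
    else pvScanB phrases rest

def should_retrieve_memories_alt (text : String) : Bool :=
  if text = "" then false
  else pvScanB pvPhrases (PySem.Chars.lower text.toList)

-- ===== PRECONDITION & SPEC =====
def Spec_should_retrieve_memories (text : String) (out : Bool) : Prop := out = should_retrieve_memories_alt text
instance (text : String) (out : Bool) : Decidable (Spec_should_retrieve_memories text out) := by unfold Spec_should_retrieve_memories; infer_instance

-- ===== CLAIM (what is proved, stated in full; the proofs are below) =====
def Claim_equal_should_retrieve_memories : Prop := ∀ (text : String), Dom_should_retrieve_memories text → Spec_should_retrieve_memories text (should_retrieve_memories text)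

-- ===== LEMMAS AND PROOFS =====

theorem pvLoopA_eq_any (ps : List String) (s : String) :
    pvLoopA ps s = ps.any (fun p => PySem.Str.isIn p s) := by
  induction ps with
  | nil => rfl
  | cons p rest ih => cases h : PySem.Str.isIn p s <;> simp [pvLoopA, h, ih]


theorem pvScanB_iff (phrases : List (List Char)) (hne : ∀ p ∈ phrases, p ≠ [])
    (l : List Char) : pvScanB phrases l = true ↔ ∃ p ∈ phrases, p <:+: l := by
  induction l with
  | nil =>
    simp only [pvScanB]
    constructor
    · intro h; exact absurd h (by simp)
    · rintro ⟨p, hp, hinf⟩; exact absurd (List.eq_nil_of_infix_nil hinf) (hne p hp)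
  | cons c rest ih =>
    have hsplit : pvScanB phrases (c :: rest)
        = ((phrases.any fun p => p.isPrefixOf (c :: rest)) || pvScanB phrases rest) := by
      simp only [pvScanB]; split_ifs with h <;> simp [h]
    rw [hsplit, Bool.or_eq_true, ih, List.any_eq_true]
    simp only [List.isPrefixOf_iff_prefix]
    constructor
    · rintro (⟨p, hp, hpre⟩ | ⟨p, hp, hinf⟩)
      · exact ⟨p, hp, hpre.isInfix⟩
      · exact ⟨p, hp, hinf.trans (List.suffix_cons c rest).isInfix⟩
    · rintro ⟨p, hp, hinf⟩
      rcases List.infix_cons_iff.mp hinf with h' | h'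
      · exact Or.inl ⟨p, hp, h'⟩
      · exact Or.inr ⟨p, hp, h'⟩

theorem pvScanB_eq_any (l : List Char) :
    pvScanB pvPhrases l = pvPhrases.any (fun p => PySem.Chars.isIn p l) := by
  have hne : ∀ p ∈ pvPhrases, p ≠ [] := by decide
  rcases h : pvPhrases.any (fun p => PySem.Chars.isIn p l) with _ | _
  · rw [List.any_eq_false] at h
    rcases hb : pvScanB pvPhrases l with _ | _
    · rfl
    · obtain ⟨p, hp, hinf⟩ := (pvScanB_iff pvPhrases hne l).mp hb
      exact absurd hinf ((PySem.Chars.isIn_eq_false_iff p l).mp (by simpa using h p hp))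
  · obtain ⟨p, hp, hin⟩ := List.any_eq_true.mp h
    exact (pvScanB_iff pvPhrases hne l).mpr ⟨p, hp, (PySem.Chars.isIn_iff_infix p l).mp hin⟩

-- ===== VERDICT (by name: the statement is the Claim_ definition above) =====
theorem should_retrieve_memories_spec : Claim_equal_should_retrieve_memories := by
  intro text _
  unfold Spec_should_retrieve_memories should_retrieve_memories should_retrieve_memories_alt
  split_ifs with h
  · rfl
  · rw [pvScanB_eq_any]
    simp only [pvLoopA_eq_any, pvPhrases, List.any_map, List.any_append]
    have hstr : ∀ p : String, PySem.Str.isIn p (PySem.Str.lower text) =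
        PySem.Chars.isIn p.toList (PySem.Chars.lower text.toList) := by
      intro p; simp [PySem.Str.isIn_eq, PySem.Str.toList_lower]
    simp only [hstr]
    split_ifs with h1 h2 <;> simp_all
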